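-- pv_equiv track=rewrite | github.com/atharva-bhange/leetcode_problems | Greedy/1217. Minimum Cost to Move Chips to The Same Position.py | solve
-- ===== SOURCE A (Python) =====
-- def solve(arr):
--     freq = {}
--     for i in arr:
--         if i in freq.keys():
--             freq[i] += 1
--         else:
--             freq[i] = 1
--
--     key = sorted(freq.keys())
--     base1 = key[0]
--     base2 = base1 + 1
--
--     if base2 not in key:
--         freq[base2] = 0
--
--     for i in range(1, len(key)):
--         if (key[i] - base1)%2 == 0:
--             freq[base1] += freq[key[i]]
--             freq[key[i]] = 0
--         elif key[i] - base2 == 0: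
--             continue
--         else:
--             freq[base2] += freq[key[i]]
--             freq[key[i]] = 0
--     if freq[base1] > freq[base2]:
--         return freq[base2]
--     else:
--         return freq[base1]
-- ===== SOURCE B (Python) =====
-- def solve(arr):
--     c = sum(1 for x in arr if x % 2 == 0)
--     return min(c, len(arr) - c)
-- ===== Notes on version B (the rewrite author's own statement) =====
-- stated objective: faster
-- what changed: Replaces the frequency dict, sort of the keys and the merge loop over sorted keys by a single pass counting even positions (all even positions merge to one pile and all odd positions to the other at cost 0, so the answer is min(#even, #odd)).
import Mathlib
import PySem

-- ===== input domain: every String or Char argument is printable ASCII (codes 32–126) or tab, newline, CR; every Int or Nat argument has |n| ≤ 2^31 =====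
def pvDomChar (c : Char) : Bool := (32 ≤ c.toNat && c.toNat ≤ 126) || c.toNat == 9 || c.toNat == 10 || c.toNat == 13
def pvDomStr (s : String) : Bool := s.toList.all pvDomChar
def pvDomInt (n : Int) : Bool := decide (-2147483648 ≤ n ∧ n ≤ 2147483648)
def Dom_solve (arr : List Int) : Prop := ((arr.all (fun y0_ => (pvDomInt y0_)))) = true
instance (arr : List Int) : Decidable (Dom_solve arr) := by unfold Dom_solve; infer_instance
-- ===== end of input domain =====

-- B replaces A's frequency dict + key sort + merge loop by one counting pass: answer = min(#even, #odd).

-- ===== PORT A =====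
-- loop body of A's 'for i in range(1, len(key))' (the freq[...] reads are exact: every key read is present)
def solveStep (base1 base2 : Int) (d : PySem.Dict Int Int) (k : Int) : PySem.Dict Int Int :=
  if PySem.Int.mod (k - base1) 2 == 0 then
    (d.insert base1 (d.getD base1 0 + d.getD k 0)).insert k 0
  else if k - base2 == 0 then d
  else (d.insert base2 (d.getD base2 0 + d.getD k 0)).insert k 0

def solve (arr : List Int) : Int :=
  let freq := arr.foldl
    (fun d i => if d.contains i then d.insert i (d.getD i 0 + 1) else d.insert i 1)
    PySem.Dict.empty
  let key := PySem.List.sorted freq.keys (fun x => x) false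
  match PySem.List.pyGet? key 0 with
  | none => 0  -- key[0] raises IndexError in Python (empty arr); excluded by Pre_solve
  | some base1 =>
    let base2 := base1 + 1
    let freq := if key.contains base2 = false then freq.insert base2 0 else freq
    let freq := (PySem.List.pyRange 1 (key.length : Int) 1).foldl
      (fun d i => solveStep base1 base2 d (PySem.List.pyGetD key i 0)) freq
    if freq.getD base1 0 > freq.getD base2 0 then freq.getD base2 0 else freq.getD base1 0

-- ===== PORT B =====
def solve_alt (arr : List Int) : Int :=
  let c := arr.foldl (fun acc x => if PySem.Int.mod x 2 == 0 then acc + 1 else acc) (0 : Int)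
  min c ((arr.length : Int) - c)

-- ===== PRECONDITION & SPEC =====
-- A raises IndexError on the empty list (key[0] on the empty key list); Pre_ excludes exactly that input.
def Pre_solve (arr : List Int) : Prop := arr ≠ []
instance (arr : List Int) : Decidable (Pre_solve arr) := by unfold Pre_solve; infer_instance
def pvWitness_solve : List Int := ([1, 2, 3])
def Spec_solve (arr : List Int) (out : Int) : Prop := out = solve_alt arr
instance (arr : List Int) (out : Int) : Decidable (Spec_solve arr out) := by unfold Spec_solve; infer_instance

-- ===== CLAIM (what is proved, stated in full; the proofs are below) =====
def Claim_equal_solve : Prop := ∀ (arr : List Int), Dom_solve arr → Pre_solve arr → Spec_solve arr (solve arr)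

-- ===== LEMMAS AND PROOFS =====

-- A's first loop builds exactly Counter(arr)
lemma freq_eq_counter (arr : List Int) :
    arr.foldl
      (fun d i => if d.contains i then d.insert i (d.getD i 0 + 1) else d.insert i 1)
      PySem.Dict.empty = PySem.Dict.counter arr := by
  rw [← PySem.Dict.foldl_insert_getD_add_one_eq_counter]
  apply PySem.List.foldl_congr_mem
  intro d x _
  by_cases h : d.contains x
  · simp [h]
  · simp [h, PySem.Dict.getD, (PySem.Dict.get?_eq_none_iff_contains d x).2 (by simpa using h)]


lemma countP_split (p : Int → Bool) (k : Int) (arr : List Int) :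
    (arr.countP p : Int)
      = ((arr.filter (fun x => !(x == k))).countP p : Int)
        + (if p k then (arr.count k : Int) else 0) := by
  induction arr with
  | nil => simp
  | cons a t ih =>
    by_cases hak : a = k
    · subst hak
      by_cases hp : p a <;> simp [hp] at * <;> omega
    · have : ¬ (a == k) = true := by simpa using hak
      by_cases hp : p a <;>
        simp [hp, this, hak] at * <;> omega

lemma sum_counts (p : Int → Bool) :
    ∀ (l arr : List Int), l.Nodup → (∀ x ∈ arr, x ∈ l) →
      ((l.filter p).map (fun k => (arr.count k : Int))).sum = (arr.countP p : Int) := by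
  intro l
  induction l with
  | nil =>
    intro arr _ hmem
    have : arr = [] := List.eq_nil_iff_forall_not_mem.2 (fun x hx => by simpa using hmem x hx)
    simp [this]
  | cons k t ih =>
    intro arr hnd hmem
    have hknt : k ∉ t := (List.nodup_cons.1 hnd).1
    have hndt : t.Nodup := (List.nodup_cons.1 hnd).2
    have hmem' : ∀ x ∈ arr.filter (fun x => !(x == k)), x ∈ t := by
      intro x hx
      rcases List.mem_filter.1 hx with ⟨hxa, hne⟩
      have hxk : x ≠ k := by simpa using hne
      have hx2 := hmem x hxa
      rw [List.mem_cons] at hx2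
      exact hx2.resolve_left hxk
    have ihh := ih (arr.filter (fun x => !(x == k))) hndt hmem'
    have hcnt : ∀ j ∈ t, (arr.filter (fun x => !(x == k))).count j = arr.count j := by
      intro j hj
      have hjk : j ≠ k := fun h => hknt (h ▸ hj)
      rw [List.count_filter]
      simp [hjk]
    have hmapeq :
        ((t.filter p).map (fun j => ((arr.filter (fun x => !(x == k))).count j : Int))).sum
          = ((t.filter p).map (fun j => (arr.count j : Int))).sum := by
      apply congrArg
      apply List.map_congr_left
      intro j hj
      rw [hcnt j (List.mem_of_mem_filter hj)]
    rw [countP_split p k arr]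
    by_cases hp : p k
    · simp [hp, ← ihh, hmapeq]; ring
    · simp [hp, ← ihh, hmapeq]


lemma sum_filter_remove (q : Int → Bool) (a : Int) (f : Int → Int) (ha : q a = true) :
    ∀ (l : List Int), l.Nodup →
      ((l.filter q).map f).sum
        = ((l.filter (fun k => q k && !(k == a))).map f).sum + (if a ∈ l then f a else 0) := by
  intro l
  induction l with
  | nil => simp
  | cons b t ih =>
    intro hnd
    have hbt : b ∉ t := (List.nodup_cons.1 hnd).1
    have hndt : t.Nodup := (List.nodup_cons.1 hnd).2
    by_cases hba : b = a
    · subst hba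
      have hfe : t.filter (fun k => q k && !(k == b)) = t.filter q := by
        apply List.filter_congr
        intro x hx
        have : x ≠ b := fun h => hbt (h ▸ hx)
        simp [this]
      rw [List.filter_cons, List.filter_cons]
      simp only [ha, if_pos, beq_self_eq_true, Bool.not_true, Bool.and_false, List.mem_cons]
      simp [ih hndt, hbt]
      ring
    · have hne : ¬ (b == a) = true := by simpa using hba
      by_cases hq : q b
      · rw [List.filter_cons, List.filter_cons]
        simp only [hq, hne, Bool.and_true, Bool.not_false, if_pos]
        have hab : ¬ a = b := fun h => hba h.symm
        simp [ih hndt, hab]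
        split_ifs <;> ring
      · have hab : ¬ a = b := fun h => hba h.symm
        simp [hq, ih hndt, hab]

-- invariant of A's merge loop over the sorted keys
lemma loop_spec (arr : List Int) (base1 : Int) :
    ∀ (t : List Int) (d : PySem.Dict Int Int), t.Nodup → (∀ k ∈ t, base1 < k) →
      (∀ k ∈ t, k ≠ base1 + 1 → d.getD k 0 = (arr.count k : Int)) →
      (t.foldl (solveStep base1 (base1 + 1)) d).getD base1 0
          = d.getD base1 0
            + ((t.filter (fun k => PySem.Int.mod (k - base1) 2 == 0)).map
                (fun k => (arr.count k : Int))).sum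
      ∧ (t.foldl (solveStep base1 (base1 + 1)) d).getD (base1 + 1) 0
          = d.getD (base1 + 1) 0
            + ((t.filter (fun k => !(PySem.Int.mod (k - base1) 2 == 0) && !(k == base1 + 1))).map
                (fun k => (arr.count k : Int))).sum := by
  intro t
  induction t with
  | nil => intro d _ _ _; simp
  | cons k t ih =>
    intro d hnd hgt hcnt
    have hkt : k ∉ t := (List.nodup_cons.1 hnd).1
    have hndt : t.Nodup := (List.nodup_cons.1 hnd).2
    have hk1 : base1 < k := hgt k (List.mem_cons_self ..)
    have hkne1 : k ≠ base1 := by omega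
    have hgt' : ∀ j ∈ t, base1 < j := fun j hj => hgt j (List.mem_cons_of_mem _ hj)
    by_cases hev : (PySem.Int.mod (k - base1) 2 == 0) = true
    · -- even branch
      have hkne2 : k ≠ base1 + 1 := by
        intro h
        subst h
        simp only [add_sub_cancel_left] at hev
        exact absurd hev (by decide)
      have hck : d.getD k 0 = (arr.count k : Int) := hcnt k (List.mem_cons_self ..) hkne2
      set d' := (d.insert base1 (d.getD base1 0 + d.getD k 0)).insert k 0 with hd'
      have hstep : solveStep base1 (base1 + 1) d k = d' := by
        unfold solveStep; rw [if_pos hev]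
      have hcnt' : ∀ j ∈ t, j ≠ base1 + 1 → d'.getD j 0 = (arr.count j : Int) := by
        intro j hj hj2
        have hjk : j ≠ k := fun h => hkt (h ▸ hj)
        have hj1 : j ≠ base1 := by have := hgt' j hj; omega
        rw [hd', PySem.Dict.getD_insert, if_neg hjk, PySem.Dict.getD_insert, if_neg hj1]
        exact hcnt j (List.mem_cons_of_mem _ hj) hj2
      obtain ⟨ih1, ih2⟩ := ih d' hndt hgt' hcnt'
      have hb1 : d'.getD base1 0 = d.getD base1 0 + (arr.count k : Int) := by
        rw [hd', PySem.Dict.getD_insert, if_neg (Ne.symm hkne1), PySem.Dict.getD_insert,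
          if_pos rfl, hck]
      have hb2 : d'.getD (base1 + 1) 0 = d.getD (base1 + 1) 0 := by
        rw [hd', PySem.Dict.getD_insert, if_neg (Ne.symm hkne2), PySem.Dict.getD_insert,
          if_neg (by omega)]
      constructor
      · rw [List.foldl_cons, hstep, ih1, hb1, List.filter_cons, if_pos hev]
        simp; ring
      · have hcond : (!(PySem.Int.mod (k - base1) 2 == 0) && !(k == base1 + 1)) = false := by
          rw [hev]; rfl
        rw [List.foldl_cons, hstep, ih2, hb2, List.filter_cons, hcond]
        simp
    · by_cases h2 : (k - (base1 + 1) == 0) = true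
      · -- k = base2: skip
        have hk2 : k = base1 + 1 := by simpa [sub_eq_zero] using h2
        have hstep : solveStep base1 (base1 + 1) d k = d := by
          unfold solveStep; rw [if_neg hev, if_pos h2]
        obtain ⟨ih1, ih2⟩ := ih d hndt hgt'
          (fun j hj hj2 => hcnt j (List.mem_cons_of_mem _ hj) hj2)
        constructor
        · rw [List.foldl_cons, hstep, ih1, List.filter_cons, if_neg (by simpa using hev)]
        · have hcond : (!(PySem.Int.mod (k - base1) 2 == 0) && !(k == base1 + 1)) = false := by
            simp [hk2]
          rw [List.foldl_cons, hstep, ih2, List.filter_cons, hcond]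
          simp
      · -- odd, k ≠ base2
        have hkne2 : k ≠ base1 + 1 := by
          intro h; exact h2 (by simp [h])
        have hck : d.getD k 0 = (arr.count k : Int) := hcnt k (List.mem_cons_self ..) hkne2
        set d' := (d.insert (base1 + 1) (d.getD (base1 + 1) 0 + d.getD k 0)).insert k 0 with hd'
        have hstep : solveStep base1 (base1 + 1) d k = d' := by
          unfold solveStep; rw [if_neg hev, if_neg h2]
        have hcnt' : ∀ j ∈ t, j ≠ base1 + 1 → d'.getD j 0 = (arr.count j : Int) := by
          intro j hj hj2
          have hjk : j ≠ k := fun h => hkt (h ▸ hj)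
          rw [hd', PySem.Dict.getD_insert, if_neg hjk, PySem.Dict.getD_insert, if_neg hj2]
          exact hcnt j (List.mem_cons_of_mem _ hj) hj2
        obtain ⟨ih1, ih2⟩ := ih d' hndt hgt' hcnt'
        have hb1 : d'.getD base1 0 = d.getD base1 0 := by
          rw [hd', PySem.Dict.getD_insert, if_neg (Ne.symm hkne1), PySem.Dict.getD_insert,
            if_neg (by omega)]
        have hb2 : d'.getD (base1 + 1) 0 = d.getD (base1 + 1) 0 + (arr.count k : Int) := by
          rw [hd', PySem.Dict.getD_insert, if_neg (Ne.symm hkne2), PySem.Dict.getD_insert,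
            if_pos rfl, hck]
        constructor
        · rw [List.foldl_cons, hstep, ih1, hb1, List.filter_cons, if_neg (by simpa using hev)]
        · rw [List.foldl_cons, hstep, ih2, hb2, List.filter_cons]
          have : (!(PySem.Int.mod (k - base1) 2 == 0) && !(k == base1 + 1)) = true := by
            simp [hkne2] at hev ⊢
            omega
          rw [if_pos this]
          simp; ring

-- the equivalence on nonempty input
lemma solve_eq_alt (arr : List Int) (hpre : arr ≠ []) : solve arr = solve_alt arr := by
  unfold solve
  simp only [freq_eq_counter, PySem.Dict.keys_counter]
  set key := PySem.List.sorted (PySem.Set.ofList arr) (fun x => x) false with hkey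
  have hkeymem : ∀ x : Int, x ∈ key ↔ x ∈ arr := by
    intro x
    rw [hkey, PySem.List.mem_sorted, PySem.Set.mem_ofList]
  have hkne : key ≠ [] := by
    intro h
    rcases List.exists_mem_of_ne_nil arr hpre with ⟨x, hx⟩
    exact absurd ((hkeymem x).2 hx) (by simp [h])
  obtain ⟨base1, rest, hcons⟩ := List.exists_cons_of_ne_nil hkne
  have hpair : key.Pairwise (· < ·) := PySem.List.sorted_ofList_pairwise_lt arr
  have hnodup : key.Nodup := hpair.imp (fun h => ne_of_lt h)
  have hget : PySem.List.pyGet? key 0 = some base1 := by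
    rw [hcons]; simp [PySem.List.pyGet?, PySem.List.pyIdx?]
  simp only [hget]
  have hrestgt : ∀ k ∈ rest, base1 < k := by
    have := hcons ▸ hpair
    exact (List.pairwise_cons.1 this).1
  have hrestnd : rest.Nodup := by
    have := hcons ▸ hnodup
    exact (List.nodup_cons.1 this).2
  -- the dict after the 'ensure base2' step has getD = count everywhere
  set d0 := if key.contains (base1 + 1) = false
    then (PySem.Dict.counter arr).insert (base1 + 1) 0 else PySem.Dict.counter arr with hd0
  have h0 : ∀ j : Int, d0.getD j 0 = (arr.count j : Int) := by
    intro j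
    rw [hd0]
    split_ifs with hc
    · by_cases hj : j = base1 + 1
      · rw [PySem.Dict.getD_insert, if_pos hj]
        have hnin : j ∉ arr := fun h => by
          rw [hj] at h
          simp [(hkeymem (base1 + 1)).2 h] at hc
        rw [List.count_eq_zero.2 hnin]
        simp
      · rw [PySem.Dict.getD_insert, if_neg hj, PySem.Dict.getD_counter]
    · rw [PySem.Dict.getD_counter]
  -- the merge loop over range(1, len(key)) is a fold over rest
  have hfold : (PySem.List.pyRange 1 (key.length : Int) 1).foldl
      (fun d i => solveStep base1 (base1 + 1) d (PySem.List.pyGetD key i 0)) d0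
      = rest.foldl (solveStep base1 (base1 + 1)) d0 := by
    rw [PySem.List.foldl_pyRange_pyGetD' key 0 (solveStep base1 (base1 + 1)) d0 (by norm_num)]
    rw [hcons]
    rfl
  rw [hfold]
  have hg1g2 := loop_spec arr base1 rest d0 hrestnd hrestgt
    (fun k hk _ => h0 k)
  obtain ⟨hg1, hg2⟩ := hg1g2
  have hmem : ∀ x ∈ arr, x ∈ key := fun x hx => (hkeymem x).2 hx
  have hpb1 : ((fun k => PySem.Int.mod (k - base1) 2 == 0) base1) = true := by simp
  have hqb2 : ((fun k => !(PySem.Int.mod (k - base1) 2 == 0)) (base1 + 1)) = true := by simp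
  -- g1 = countP even arr
  have hE : (rest.foldl (solveStep base1 (base1 + 1)) d0).getD base1 0
      = (arr.countP (fun k => PySem.Int.mod (k - base1) 2 == 0) : Int) := by
    rw [hg1, h0]
    rw [← sum_counts (fun k => PySem.Int.mod (k - base1) 2 == 0) key arr hnodup hmem, hcons,
      List.filter_cons, if_pos hpb1]
    simp
  -- g2 = countP odd arr
  have hkeyq : key.filter (fun k => !(PySem.Int.mod (k - base1) 2 == 0))
      = rest.filter (fun k => !(PySem.Int.mod (k - base1) 2 == 0)) := by
    rw [hcons, List.filter_cons, if_neg (by simp)]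
  have hG : (rest.foldl (solveStep base1 (base1 + 1)) d0).getD (base1 + 1) 0
      = (arr.countP (fun k => !(PySem.Int.mod (k - base1) 2 == 0)) : Int) := by
    rw [hg2, h0]
    rw [← sum_counts (fun k => !(PySem.Int.mod (k - base1) 2 == 0)) key arr hnodup hmem, hkeyq,
      sum_filter_remove (fun k => !(PySem.Int.mod (k - base1) 2 == 0)) (base1 + 1)
        (fun k => (arr.count k : Int)) hqb2 rest hrestnd]
    by_cases hm : (base1 + 1) ∈ rest
    · rw [if_pos hm]
      ring
    · rw [if_neg hm]
      have hnin : (base1 + 1) ∉ arr := by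
        intro h
        have h2 := (hkeymem (base1 + 1)).2 h
        rw [hcons] at h2
        rcases List.mem_cons.1 h2 with h1 | h1
        · omega
        · exact hm h1
      rw [List.count_eq_zero.2 hnin]
      push_cast
      ring
  rw [hE, hG]
  -- B's side
  unfold solve_alt
  rw [PySem.List.foldl_if_add_one]
  have hsum : arr.length
      = arr.countP (fun k => PySem.Int.mod (k - base1) 2 == 0)
        + arr.countP (fun k => !(PySem.Int.mod (k - base1) 2 == 0)) := by
    have h := List.length_eq_countP_add_countP (l := arr)
      (fun k => PySem.Int.mod (k - base1) 2 == 0)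
    have he : arr.countP (fun a => decide (¬ ((PySem.Int.mod (a - base1) 2 == 0) = true)))
        = arr.countP (fun k => !(PySem.Int.mod (k - base1) 2 == 0)) := by
      apply List.countP_congr
      intro a _
      simp
    omega
  by_cases hb : base1 % 2 = 0
  · have hpar : arr.countP (fun k => PySem.Int.mod (k - base1) 2 == 0)
        = arr.countP (fun x => PySem.Int.mod x 2 == 0) := by
      apply List.countP_congr
      intro a _
      simp
      omega
    rw [min_def]
    split_ifs <;> omega
  · have hpar : arr.countP (fun k => !(PySem.Int.mod (k - base1) 2 == 0))
        = arr.countP (fun x => PySem.Int.mod x 2 == 0) := by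
      apply List.countP_congr
      intro a _
      simp
      omega
    rw [min_def]
    split_ifs <;> omega

-- ===== VERDICT (by name: the statement is the Claim_ definition above) =====
theorem solve_spec : Claim_equal_solve := by
  intro arr _ hpre
  unfold Spec_solve
  exact solve_eq_alt arr hpre
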